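-- pv_equiv track=rewrite | github.com/yuehanw/python | SI506/problem_set_06/LF/problem_set_06LF.py | transform_a_list_odd
-- ===== SOURCE A (Python) =====
-- def transform_a_list_odd(list_of_strings):
--     lstOdd = []
--     for index in range(len(list_of_strings)):
--         if index%2 == 0:
--             lstOdd.append(list_of_strings[index])
--
--     lstOfPunctuation = ["-", "...", ",",".", "?", "!"]
--     for i in range(len(lstOdd)):
--         for eachPunctuation in lstOfPunctuation:
--             lstOdd[i] = lstOdd[i].lower().replace(eachPunctuation,'')
--     return lstOdd
-- ===== SOURCE B (Python) =====
-- def transform_a_list_odd(list_of_strings):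
--     punct = {'-', ',', '.', '?', '!'}
--     return [''.join(c for c in s.lower() if c not in punct)
--             for s in list_of_strings[::2]]
-- ===== Notes on version B (the rewrite author's own statement) =====
-- stated objective: simpler
-- what changed: Replaces the index loop with parity test and the six sequential lower+replace passes per string by a single comprehension over the step-2 slice that lowercases once and filters punctuation characters in one pass (the redundant '...' pattern is subsumed by removing '.').
import Mathlib
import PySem

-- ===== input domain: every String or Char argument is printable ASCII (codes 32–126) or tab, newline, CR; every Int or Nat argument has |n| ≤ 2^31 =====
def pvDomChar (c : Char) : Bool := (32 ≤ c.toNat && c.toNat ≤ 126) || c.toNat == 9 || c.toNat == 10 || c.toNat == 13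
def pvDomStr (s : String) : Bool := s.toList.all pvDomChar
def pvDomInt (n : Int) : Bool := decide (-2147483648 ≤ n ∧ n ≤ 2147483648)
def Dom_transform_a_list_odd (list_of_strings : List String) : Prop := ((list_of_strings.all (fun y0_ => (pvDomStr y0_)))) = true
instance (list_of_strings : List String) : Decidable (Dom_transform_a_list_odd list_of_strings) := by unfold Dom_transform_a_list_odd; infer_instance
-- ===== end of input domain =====

-- B replaces the index/parity loop and the six sequential lower()+replace() passes by one
-- comprehension over the step-2 slice that lowercases once and filters punctuation characters in a
-- single pass; objective: simpler.

-- ===== PORT A =====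
-- the punctuation list literal of A
def pvPunctA : List String := ["-", "...", ",", ".", "?", "!"]

-- first loop: for index in range(len): if index % 2 == 0: append list_of_strings[index]
-- (index is always in range, so pyGetD's default is never used); the second loop rewrites each
-- slot lstOdd[i] independently in place, rendered as a map whose body is the inner
-- for-eachPunctuation loop as a foldl.
def transform_a_list_odd (list_of_strings : List String) : List String :=
  let lstOdd := (PySem.List.pyRange 0 (list_of_strings.length : Int) 1).foldl
    (fun acc index => if index % 2 == 0 then acc ++ [PySem.List.pyGetD list_of_strings index ""] else acc) []
  lstOdd.map (fun s => pvPunctA.foldl (fun t p => PySem.Str.replace (PySem.Str.lower t) p "") s)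

-- ===== PORT B =====
-- list_of_strings[::2]; step 2 ≠ 0 so slice? is always some and getD's default is never used.
-- ''.join(c for c in s.lower() if c not in punct) is the character filter + join, ported exactly as
-- String.ofList of the filtered code-point list.
def transform_a_list_odd_alt (list_of_strings : List String) : List String :=
  ((PySem.List.slice? list_of_strings none none 2).getD []).map (fun s =>
    String.ofList ((PySem.Str.lower s).toList.filter (fun c => !(['-', ',', '.', '?', '!'].contains c))))

-- ===== PRECONDITION & SPEC =====
def Spec_transform_a_list_odd (list_of_strings : List String) (out : List String) : Prop := out = transform_a_list_odd_alt list_of_strings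
instance (list_of_strings : List String) (out : List String) : Decidable (Spec_transform_a_list_odd list_of_strings out) := by unfold Spec_transform_a_list_odd; infer_instance

-- ===== CLAIM (what is proved, stated in full; the proofs are below) =====
def Claim_equal_transform_a_list_odd : Prop := ∀ (list_of_strings : List String), Dom_transform_a_list_odd list_of_strings → Spec_transform_a_list_odd list_of_strings (transform_a_list_odd list_of_strings)

-- ===== LEMMAS AND PROOFS =====

-- the even-index elements of a list
def pvEvens : List String → List String
  | [] => []
  | [a] => [a]
  | a :: _ :: t => a :: pvEvens t

-- A's selection loop produces the even-index elements
theorem pvSelNat (xs : List String) :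
    ((List.range xs.length).filter (fun k => k % 2 == 0)).map (fun k => xs.getD k "") = pvEvens xs := by
  induction xs using pvEvens.induct with
  | case1 => simp [pvEvens]
  | case2 a => simp [pvEvens]
  | case3 a b t ih =>
    show ((List.range (t.length + 1 + 1)).filter (fun k => k % 2 == 0)).map (fun k => (a :: b :: t).getD k "") = a :: pvEvens t
    rw [List.range_succ_eq_map, List.range_succ_eq_map]
    simp only [List.filter_cons, List.filter_map, List.map_cons, List.map_map]
    norm_num
    rw [List.filter_congr (q := fun k => k % 2 == 0) (by intro x _; simp [Function.comp, Nat.succ_eq_add_one]; omega)]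
    rw [← ih]
    apply List.map_congr_left
    intro k _
    simp [Function.comp, Nat.succ_eq_add_one]

theorem pvSelA (xs : List String) :
    (PySem.List.pyRange 0 (xs.length : Int) 1).foldl
      (fun acc index => if index % 2 == 0 then acc ++ [PySem.List.pyGetD xs index ""] else acc) []
    = pvEvens xs := by
  rw [PySem.List.foldl_append_if (p := fun index : Int => index % 2 == 0) (f := fun index => PySem.List.pyGetD xs index "")]
  rw [PySem.List.pyRange_one]
  simp only [Int.sub_zero, Int.toNat_natCast, List.filter_map, List.map_map, List.nil_append, zero_add]
  rw [← pvSelNat]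
  rw [List.filter_congr (q := fun k => k % 2 == 0) (by intro x _; simp [Function.comp]; omega)]
  apply List.map_congr_left
  intro k _
  simp [Function.comp, PySem.List.pyGetD_natCast]

-- the step-2 slice is the even-index elements
theorem pvSliceNat (xs : List String) :
    List.filterMap (fun k : Nat => xs[2 * k]?) (List.range ((xs.length + 1) / 2)) = pvEvens xs := by
  induction xs using pvEvens.induct with
  | case1 => simp [pvEvens]
  | case2 a => simp [pvEvens]
  | case3 a b t ih =>
    show List.filterMap (fun k : Nat => (a :: b :: t)[2 * k]?) (List.range ((t.length + 1 + 1 + 1) / 2)) = a :: pvEvens t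
    have h : (t.length + 1 + 1 + 1) / 2 = (t.length + 1) / 2 + 1 := by omega
    rw [h, List.range_succ_eq_map, List.filterMap_cons, List.filterMap_map]
    simp only [Nat.mul_zero, List.getElem?_cons_zero]
    rw [← ih]
    apply congrArg
    apply List.filterMap_congr
    intro k _
    simp [Function.comp, Nat.succ_eq_add_one, Nat.mul_add]

theorem pvSliceB (xs : List String) :
    (PySem.List.slice? xs none none 2).getD [] = pvEvens xs := by
  rw [show (PySem.List.slice? xs none none 2) = some (List.filterMap (fun k : Nat => xs[((0:Int) + 2 * (k:Int)).toNat]?) (List.range (if (0:Int) < (xs.length:Int) then (((xs.length:Int) - 0 + 2 - 1) / 2).toNat else 0))) from by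
    simp [PySem.List.slice?, PySem.List.sliceIndices]]
  simp only [Option.getD_some]
  rw [show (if (0:Int) < (xs.length:Int) then (((xs.length:Int) - 0 + 2 - 1) / 2).toNat else 0) = (xs.length + 1) / 2 from by split_ifs with h <;> omega]
  rw [← pvSliceNat]
  apply List.filterMap_congr
  intro k _
  congr 1
  omega

-- character-level facts
theorem pvLowerCharIdem (c : Char) :
    PySem.Chars.lowerChar (PySem.Chars.lowerChar c) = PySem.Chars.lowerChar c := by
  unfold PySem.Chars.lowerChar PySem.Chars.isupper
  by_cases h : 'A' ≤ c ∧ c ≤ 'Z'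
  · have h90 : c.toNat ≤ 90 := by
      have := UInt32.le_iff_toNat_le.mp (Char.le_def.mp h.2)
      simpa using this
    have hv : Nat.isValidChar (c.toNat + 32) := Or.inl (by omega)
    have htn : (Char.ofNat (c.toNat + 32)).toNat = c.toNat + 32 := by
      rw [Char.toNat_ofNat, if_pos hv]
    simp only [h.1, h.2, decide_true, Bool.and_self, if_pos]
    have hnot : ¬ ('A' ≤ Char.ofNat (c.toNat + 32) ∧ Char.ofNat (c.toNat + 32) ≤ 'Z') := by
      rintro ⟨-, h2⟩
      have h65 : 65 ≤ c.toNat := by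
        have := UInt32.le_iff_toNat_le.mp (Char.le_def.mp h.1)
        simpa using this
      have := UInt32.le_iff_toNat_le.mp (Char.le_def.mp h2)
      rw [show (Char.ofNat (c.toNat + 32)).val.toNat = c.toNat + 32 from htn] at this
      have hz : ('Z').val.toNat = 90 := by decide
      omega
    rcases not_and_or.mp hnot with h' | h' <;> simp [h']
  · have hb : (decide ('A' ≤ c) && decide (c ≤ 'Z')) = false := by
      rcases not_and_or.mp h with h' | h' <;> simp [h']
    simp [hb]

-- replace with a one-character pattern and empty replacement is a character filter
theorem pvGoSingle (c : Char) : ∀ (fuel : Nat) (l acc : List Char), l.length ≤ fuel →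
    PySem.Chars.replace.go [c] [] fuel l acc = acc.reverse ++ l.filter (· ≠ c) := by
  intro fuel
  induction fuel with
  | zero =>
    intro l acc h
    have : l = [] := List.length_eq_zero_iff.mp (Nat.le_zero.mp h)
    subst this
    simp [PySem.Chars.replace.go]
  | succ fuel ih =>
    intro l acc h
    cases l with
    | nil => simp [PySem.Chars.replace.go]
    | cons d t =>
      rw [PySem.Chars.replace.go]
      by_cases hd : d = c
      · subst hd
        have hp : [d].isPrefixOf (d :: t) = true := by simp [List.isPrefixOf]
        rw [if_pos hp]
        simp only [List.length_singleton, List.drop_one, List.tail_cons, List.reverse_nil, List.nil_append]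
        rw [ih t acc (by simpa using h)]
        simp
      · have hp : [c].isPrefixOf (d :: t) = false := by
          simp [List.isPrefixOf]
          exact fun hh => absurd hh.symm hd
        rw [if_neg (by simp [hp])]
        rw [ih t (d :: acc) (by simpa using Nat.le_of_succ_le_succ h)]
        simp [hd]

theorem pvReplaceSingle (c : Char) (cs : List Char) :
    PySem.Chars.replace cs [c] [] = cs.filter (· ≠ c) := by
  unfold PySem.Chars.replace
  rw [if_neg (by simp)]
  rw [pvGoSingle c cs.length cs [] (le_refl _)]
  simp

-- replacing "..." by "" deletes only dots: the result is a sublist agreeing on non-dot characters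
theorem pvGoDots : ∀ (fuel : Nat) (l acc : List Char),
    ∃ r, PySem.Chars.replace.go ['.', '.', '.'] [] fuel l acc = acc.reverse ++ r ∧
      r.Sublist l ∧ r.filter (· ≠ '.') = l.filter (· ≠ '.') := by
  intro fuel
  induction fuel with
  | zero =>
    intro l acc
    exact ⟨l, by simp [PySem.Chars.replace.go], List.Sublist.refl l, rfl⟩
  | succ fuel ih =>
    intro l acc
    cases l with
    | nil => exact ⟨[], by simp [PySem.Chars.replace.go], by simp, rfl⟩
    | cons d t =>
      rw [PySem.Chars.replace.go]
      by_cases hp : ['.', '.', '.'].isPrefixOf (d :: t) = true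
      · rw [if_pos hp]
        obtain ⟨u, hu⟩ := List.isPrefixOf_iff_prefix.mp hp
        obtain ⟨r, h1, h2, h3⟩ := ih (List.drop 3 (d :: t)) acc
        refine ⟨r, by simpa using h1, ?_, ?_⟩
        · have hdrop : List.drop 3 (d :: t) = u := by rw [← hu]; simp
          rw [hdrop] at h2
          exact h2.trans (by rw [← hu]; exact List.sublist_append_right _ _)
        · have hdt : d :: t = '.' :: '.' :: '.' :: u := by rw [← hu]; rfl
          have hdrop : List.drop 3 (d :: t) = u := by rw [hdt]; rfl
          rw [hdrop] at h3
          rw [h3, hdt]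
          simp
      · rw [if_neg hp]
        obtain ⟨r, h1, h2, h3⟩ := ih t (d :: acc)
        refine ⟨d :: r, by simpa using h1, List.Sublist.cons₂ d h2, ?_⟩
        simp only [List.filter_cons]
        by_cases hd : d = '.' <;> simpa [hd] using h3

theorem pvReplaceDots (cs : List Char) :
    ∃ r, PySem.Chars.replace cs ['.', '.', '.'] [] = r ∧
      r.Sublist cs ∧ r.filter (· ≠ '.') = cs.filter (· ≠ '.') := by
  unfold PySem.Chars.replace
  rw [if_neg (by simp)]
  obtain ⟨r, h1, h2, h3⟩ := pvGoDots cs.length cs []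
  exact ⟨r, by simpa using h1, h2, h3⟩

theorem pvLowerEqSelf (cs : List Char) (h : ∀ x ∈ cs, PySem.Chars.lowerChar x = x) :
    PySem.Chars.lower cs = cs := by
  unfold PySem.Chars.lower
  exact (List.map_congr_left h).trans (List.map_id _)

theorem pvLoweredLower (cs : List Char) :
    ∀ x ∈ PySem.Chars.lower cs, PySem.Chars.lowerChar x = x := by
  intro x hx
  unfold PySem.Chars.lower at hx
  obtain ⟨y, -, rfl⟩ := List.mem_map.mp hx
  exact pvLowerCharIdem y

theorem pvLoweredFilter (p : Char → Bool) (cs : List Char)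
    (h : ∀ x ∈ cs, PySem.Chars.lowerChar x = x) :
    ∀ x ∈ cs.filter p, PySem.Chars.lowerChar x = x :=
  fun x hx => h x (List.mem_of_mem_filter hx)

theorem pvFilterSwap (p q : Char → Bool) (l : List Char) :
    (l.filter p).filter q = (l.filter q).filter p := by
  rw [List.filter_filter, List.filter_filter]
  exact List.filter_congr (fun x _ => Bool.and_comm (q x) (p x))

-- the six lower+replace passes collapse to one filter of the lowercased character list
theorem pvChainChars (cs : List Char) :
    PySem.Chars.replace (PySem.Chars.lower (PySem.Chars.replace (PySem.Chars.lower (PySem.Chars.replace (PySem.Chars.lower (PySem.Chars.replace (PySem.Chars.lower (PySem.Chars.replace (PySem.Chars.lower (PySem.Chars.replace (PySem.Chars.lower cs) ['-'] [])) ['.', '.', '.'] [])) [','] [])) ['.'] [])) ['?'] [])) ['!'] []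
    = (PySem.Chars.lower cs).filter (fun c => !(['-', ',', '.', '?', '!'].contains c)) := by
  have hls := pvLoweredLower cs
  rw [pvReplaceSingle '-']
  have h1 := pvLoweredFilter (· ≠ '-') _ hls
  rw [pvLowerEqSelf _ h1]
  obtain ⟨r, hreq, hsub, hfilt⟩ := pvReplaceDots ((PySem.Chars.lower cs).filter (· ≠ '-'))
  rw [hreq]
  have hr : ∀ x ∈ r, PySem.Chars.lowerChar x = x := fun x hx => h1 x (hsub.mem hx)
  rw [pvLowerEqSelf _ hr, pvReplaceSingle ',',
      pvLowerEqSelf _ (pvLoweredFilter (· ≠ ',') _ hr), pvReplaceSingle '.',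
      pvLowerEqSelf _ (pvLoweredFilter (· ≠ '.') _ (pvLoweredFilter (· ≠ ',') _ hr)), pvReplaceSingle '?',
      pvLowerEqSelf _ (pvLoweredFilter (· ≠ '?') _ (pvLoweredFilter (· ≠ '.') _ (pvLoweredFilter (· ≠ ',') _ hr))), pvReplaceSingle '!']
  rw [pvFilterSwap (· ≠ ',') (· ≠ '.') r, hfilt]
  simp only [List.filter_filter]
  apply List.filter_congr
  intro x _
  by_cases h1 : x = '-' <;> by_cases h2 : x = ',' <;> by_cases h3 : x = '.' <;>
    by_cases h4 : x = '?' <;> by_cases h5 : x = '!' <;> simp [h1, h2, h3, h4, h5]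

-- per string: A's fold of six replace passes equals B's single punctuation filter
theorem pvClean (s : String) :
    pvPunctA.foldl (fun t p => PySem.Str.replace (PySem.Str.lower t) p "") s
    = String.ofList ((PySem.Str.lower s).toList.filter (fun c => !(['-', ',', '.', '?', '!'].contains c))) := by
  simp only [pvPunctA, List.foldl_cons, List.foldl_nil]
  rw [← String.toList_inj]
  simp only [PySem.Str.toList_replace, PySem.Str.toList_lower, String.toList_ofList,
    show "-".toList = ['-'] from rfl, show "...".toList = ['.', '.', '.'] from rfl,
    show ",".toList = [','] from rfl, show ".".toList = ['.'] from rfl,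
    show "?".toList = ['?'] from rfl, show "!".toList = ['!'] from rfl,
    show "".toList = ([] : List Char) from rfl]
  exact pvChainChars s.toList

-- ===== VERDICT (by name: the statement is the Claim_ definition above) =====
theorem transform_a_list_odd_spec : Claim_equal_transform_a_list_odd := by
  intro xs _
  show transform_a_list_odd xs = transform_a_list_odd_alt xs
  unfold transform_a_list_odd transform_a_list_odd_alt
  rw [pvSelA, pvSliceB]
  exact List.map_congr_left (fun s _ => pvClean s)
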